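-- pv_equiv track=rewrite | github.com/utdcsg/TexSAW-2026 | rev/src/gen.py | get_real_func
-- ===== SOURCE A (Python) =====
-- MULTIPLIER = 131    # used for hashing
--
-- def get_real_func(idx, full_flag):
--     # Pre-calculate the correct 4 hash states for the flag
--     targets = [0, 0, 0, 0]
--     for i, c in enumerate(full_flag):
--         b = ord(c)
--         stream = i % 4
--         targets[stream] = (targets[stream] * MULTIPLIER + b) & 0xFFFFFFFFFFFFFFFF
--
--     code = f"void func_{idx}(char *input) {{\n"
--     code += "    uint64_t s[4] = {0, 0, 0, 0};\n"
--     code += "    size_t len = strlen(input);\n"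
--     code += "    for(size_t i = 0; i < len; i++) {\n"
--     code += "        uint64_t b = (uint64_t)input[i];\n"
--
--     # Generate C code to perform: s[i%4] = s[i%4] * 131 + b
--     # We implement (x * 131) as ((x << 7) + (x << 1) + x) to hide the constant
--     # We do not use MBA to make this solvable with angr
--
--     # Step A: calc (x << 7) + (x << 1)
--     code += f"        uint64_t v = s[i%4];\n"
--     code += f"        uint64_t term1 = (v << 7);\n"
--     code += f"        uint64_t term2 = (v << 1);\n"
--     code += f"        uint64_t step1 = term1 + term2;\n" # 128x + 2x
--
--     # Step B: calc (130x) + x  -> 131x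
--     code += f"        uint64_t mult = step1 + v;\n"
--
--     # Step C: add char b
--     code += f"        s[i%4] = mult + b;\n"
--     code += "    }\n"
--
--     # 3. Verification Check
--     code += f"    if (s[0] == {targets[0]}ULL && s[1] == {targets[1]}ULL && "
--     code += f"s[2] == {targets[2]}ULL && s[3] == {targets[3]}ULL) {{\n"
--     code += "        printf(\"\\033[0;32m[SUCCESS] Flag: %s\\033[0m\\n\", input);\n"
--     code += "    } else { exit(1); }\n"
--     code += "}\n"
--     return code
-- ===== SOURCE B (Python) =====
-- MULTIPLIER = 131    # used for hashing
--
--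
-- def _stream_hash(chars):
--     # One running accumulator over a single stream of characters.
--     h = 0
--     for c in chars:
--         h = (h * MULTIPLIER + ord(c)) & 0xFFFFFFFFFFFFFFFF
--     return h
--
--
-- def get_real_func(idx, full_flag):
--     # Four independent strided passes, one per residue class i % 4,
--     # instead of one interleaved scan maintaining four accumulators.
--     t0 = _stream_hash(full_flag[0::4])
--     t1 = _stream_hash(full_flag[1::4])
--     t2 = _stream_hash(full_flag[2::4])
--     t3 = _stream_hash(full_flag[3::4])
--
--     # The C template is assembled as a flat list of fragments joined once,
--     # instead of repeated string concatenation.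
--     parts = [
--         f"void func_{idx}(char *input) {{\n",
--         "    uint64_t s[4] = {0, 0, 0, 0};\n",
--         "    size_t len = strlen(input);\n",
--         "    for(size_t i = 0; i < len; i++) {\n",
--         "        uint64_t b = (uint64_t)input[i];\n",
--         "        uint64_t v = s[i%4];\n",
--         "        uint64_t term1 = (v << 7);\n",
--         "        uint64_t term2 = (v << 1);\n",
--         "        uint64_t step1 = term1 + term2;\n",
--         "        uint64_t mult = step1 + v;\n",
--         "        s[i%4] = mult + b;\n",
--         "    }\n",
--         f"    if (s[0] == {t0}ULL && s[1] == {t1}ULL && s[2] == {t2}ULL && s[3] == {t3}ULL) {{\n",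
--         "        printf(\"\\033[0;32m[SUCCESS] Flag: %s\\033[0m\\n\", input);\n",
--         "    } else { exit(1); }\n",
--         "}\n",
--     ]
--     return "".join(parts)
-- ===== Notes on version B (the rewrite author's own statement) =====
-- stated objective: alternative
-- what changed: The single interleaved hash loop maintaining four accumulators indexed by i % 4 is replaced by four independent strided passes, each hashing one residue class full_flag[s::4] with its own single running accumulator, and the repeated string concatenation is replaced by joining a flat list of template fragments once.
import Mathlib
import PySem

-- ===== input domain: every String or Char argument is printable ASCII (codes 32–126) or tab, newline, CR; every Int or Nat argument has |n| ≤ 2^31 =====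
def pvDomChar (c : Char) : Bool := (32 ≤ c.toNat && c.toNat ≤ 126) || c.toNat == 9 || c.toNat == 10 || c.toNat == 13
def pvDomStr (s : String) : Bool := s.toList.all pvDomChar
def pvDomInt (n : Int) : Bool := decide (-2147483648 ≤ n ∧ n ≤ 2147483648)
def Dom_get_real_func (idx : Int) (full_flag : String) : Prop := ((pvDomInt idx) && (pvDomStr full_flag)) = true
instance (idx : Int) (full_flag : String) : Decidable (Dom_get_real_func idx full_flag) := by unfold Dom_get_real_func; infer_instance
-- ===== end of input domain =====

-- B replaces A's single interleaved hash loop (one pass, four accumulators indexed by i % 4)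
-- with four independent strided passes, one per residue class, and assembles the C template by
-- joining a flat fragment list instead of repeated concatenation. Objective: alternative; same cost.

-- ===== PORT A =====
-- A's loop body: targets[stream] = (targets[stream] * 131 + ord(c)) & 0xFFFFFFFFFFFFFFFF.
-- targets has fixed length 4 and stream = i % 4 < 4, so List.getD/List.set are exact for the
-- Python list read/assignment here.
def pvStepA (t : List Int) (p : Int × Char) : List Int :=
  let b : Int := (p.2.toNat : Int)
  let stream : Nat := (PySem.Int.mod p.1 4).toNat
  t.set stream (PySem.Int.band (t.getD stream 0 * 131 + b) 0xFFFFFFFFFFFFFFFF)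

def get_real_func (idx : Int) (full_flag : String) : String :=
  let targets : List Int :=
    (PySem.List.enumerate full_flag.toList 0).foldl pvStepA [0, 0, 0, 0]
  "void func_" ++ PySem.Int.toStr idx ++ "(char *input) {\n"
  ++ "    uint64_t s[4] = {0, 0, 0, 0};\n"
  ++ "    size_t len = strlen(input);\n"
  ++ "    for(size_t i = 0; i < len; i++) {\n"
  ++ "        uint64_t b = (uint64_t)input[i];\n"
  ++ "        uint64_t v = s[i%4];\n"
  ++ "        uint64_t term1 = (v << 7);\n"
  ++ "        uint64_t term2 = (v << 1);\n"
  ++ "        uint64_t step1 = term1 + term2;\n"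
  ++ "        uint64_t mult = step1 + v;\n"
  ++ "        s[i%4] = mult + b;\n"
  ++ "    }\n"
  ++ "    if (s[0] == " ++ PySem.Int.toStr (targets.getD 0 0) ++ "ULL && s[1] == "
  ++ PySem.Int.toStr (targets.getD 1 0) ++ "ULL && "
  ++ "s[2] == " ++ PySem.Int.toStr (targets.getD 2 0) ++ "ULL && s[3] == "
  ++ PySem.Int.toStr (targets.getD 3 0) ++ "ULL) {\n"
  ++ "        printf(\"\\033[0;32m[SUCCESS] Flag: %s\\033[0m\\n\", input);\n"
  ++ "    } else { exit(1); }\n"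
  ++ "}\n"

-- ===== PORT B =====
-- full_flag[s::4] is ported by hand: the step-4 slice of l starting at s is pvStride4 (l.drop s)
-- (exact for 0 ≤ s: keep the head, then skip 3).
def pvStride4 : List Char → List Char
  | [] => []
  | c :: rest => c :: pvStride4 (rest.drop 3)
termination_by l => l.length
decreasing_by simp

-- Source B's _stream_hash: the for loop as tail recursion over the stream, accumulator h.
def pvStreamHash : Int → List Char → Int
  | h, [] => h
  | h, c :: rest => pvStreamHash (PySem.Int.band (h * 131 + (c.toNat : Int)) 0xFFFFFFFFFFFFFFFF) rest

def get_real_func_alt (idx : Int) (full_flag : String) : String :=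
  let cs := full_flag.toList
  let t0 := pvStreamHash 0 (pvStride4 cs)
  let t1 := pvStreamHash 0 (pvStride4 (cs.drop 1))
  let t2 := pvStreamHash 0 (pvStride4 (cs.drop 2))
  let t3 := pvStreamHash 0 (pvStride4 (cs.drop 3))
  String.join
    [ "void func_" ++ PySem.Int.toStr idx ++ "(char *input) {\n",
      "    uint64_t s[4] = {0, 0, 0, 0};\n",
      "    size_t len = strlen(input);\n",
      "    for(size_t i = 0; i < len; i++) {\n",
      "        uint64_t b = (uint64_t)input[i];\n",
      "        uint64_t v = s[i%4];\n",
      "        uint64_t term1 = (v << 7);\n",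
      "        uint64_t term2 = (v << 1);\n",
      "        uint64_t step1 = term1 + term2;\n",
      "        uint64_t mult = step1 + v;\n",
      "        s[i%4] = mult + b;\n",
      "    }\n",
      "    if (s[0] == " ++ PySem.Int.toStr t0 ++ "ULL && s[1] == " ++ PySem.Int.toStr t1
        ++ "ULL && s[2] == " ++ PySem.Int.toStr t2 ++ "ULL && s[3] == " ++ PySem.Int.toStr t3
        ++ "ULL) {\n",
      "        printf(\"\\033[0;32m[SUCCESS] Flag: %s\\033[0m\\n\", input);\n",
      "    } else { exit(1); }\n",
      "}\n" ]

-- ===== PRECONDITION & SPEC =====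
def Spec_get_real_func (idx : Int) (full_flag : String) (out : String) : Prop := out = get_real_func_alt idx full_flag
instance (idx : Int) (full_flag : String) (out : String) : Decidable (Spec_get_real_func idx full_flag out) := by unfold Spec_get_real_func; infer_instance

-- ===== CLAIM (what is proved, stated in full; the proofs are below) =====
def Claim_equal_get_real_func : Prop := ∀ (idx : Int) (full_flag : String), Dom_get_real_func idx full_flag → Spec_get_real_func idx full_flag (get_real_func idx full_flag)

-- ===== LEMMAS AND PROOFS =====

-- Interleaved fold over enumerated characters = one stream-hash pass per residue class.
lemma pvFold_eq : ∀ (n : Nat) (l : List Char), l.length ≤ n → ∀ (j : Int), 0 ≤ j → j % 4 = 0 →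
    ∀ (t0 t1 t2 t3 : Int),
    (PySem.List.enumerate l j).foldl pvStepA [t0, t1, t2, t3]
      = [pvStreamHash t0 (pvStride4 l),
         pvStreamHash t1 (pvStride4 (l.drop 1)),
         pvStreamHash t2 (pvStride4 (l.drop 2)),
         pvStreamHash t3 (pvStride4 (l.drop 3))] := by
  intro n
  induction n with
  | zero =>
    intro l hl j hj0 hj4 t0 t1 t2 t3
    have hnil : l = [] := by cases l <;> simp_all
    subst hnil
    simp [PySem.List.enumerate_nil, pvStride4, pvStreamHash]
  | succ n ih =>
    intro l hl j hj0 hj4 t0 t1 t2 t3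
    have h0 : (j % 4).toNat = 0 := by omega
    have h1 : ((j + 1) % 4).toNat = 1 := by omega
    have h2 : ((j + 1 + 1) % 4).toNat = 2 := by omega
    have h3 : ((j + 1 + 1 + 1) % 4).toNat = 3 := by omega
    match l with
    | [] => simp [PySem.List.enumerate_nil, pvStride4, pvStreamHash]
    | [a] =>
      simp [PySem.List.enumerate_cons, PySem.List.enumerate_nil, pvStepA, pvStride4, pvStreamHash, h0]
    | [a, b] =>
      simp [PySem.List.enumerate_cons, PySem.List.enumerate_nil, pvStepA, pvStride4, pvStreamHash, h0, h1]
    | [a, b, c] =>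
      simp [PySem.List.enumerate_cons, PySem.List.enumerate_nil, pvStepA, pvStride4, pvStreamHash, h0, h1, h2]
    | a :: b :: c :: d :: rest =>
      have hr : rest.length ≤ n := by simp at hl; omega
      have hrec := ih rest hr (j + 4) (by omega) (by omega)
        (PySem.Int.band (t0 * 131 + ((a.toNat : Int))) 0xFFFFFFFFFFFFFFFF)
        (PySem.Int.band (t1 * 131 + ((b.toNat : Int))) 0xFFFFFFFFFFFFFFFF)
        (PySem.Int.band (t2 * 131 + ((c.toNat : Int))) 0xFFFFFFFFFFFFFFFF)
        (PySem.Int.band (t3 * 131 + ((d.toNat : Int))) 0xFFFFFFFFFFFFFFFF)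
      have hj44 : j + 1 + 1 + 1 + 1 = j + 4 := by ring
      simp only [PySem.List.enumerate_cons, List.foldl_cons, pvStepA,
        PySem.Int.mod_eq_emod_of_pos (b := 4) (by norm_num), h0, h1, h2, h3,
        List.set_cons_zero, List.set_cons_succ, List.getD,
        List.getElem?_cons_zero, List.getElem?_cons_succ,
        Option.getD_some, hj44]
      rw [hrec]
      simp [pvStride4, pvStreamHash]

-- ===== VERDICT (by name: the statement is the Claim_ definition above) =====
theorem get_real_func_spec : Claim_equal_get_real_func := by
  intro idx full_flag _
  unfold Spec_get_real_func get_real_func get_real_func_alt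
  rw [pvFold_eq full_flag.toList.length full_flag.toList le_rfl 0 (by omega) (by omega)]
  simp only [List.getD, List.getElem?_cons_zero, List.getElem?_cons_succ, Option.getD_some]
  simp [String.join, String.append_assoc]
  conv_rhs => rw [← String.append_assoc]
  simp
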